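-- pv_equiv track=rewrite | github.com/ajurna/aoc2024 | 17/main.py | optimised
-- ===== SOURCE A (Python) =====
-- def optimised(a: int):
--     # This is not a generic solution and will probably only work for my problem statement.
--     out = []
--     a = a
--     while a > 0:
--         b = (a % 8) ^ 1
--         c = a // (2 ** b)
--         b = b ^ c ^ 4
--         a = a // 8
--         out.append(b % 8)
--     return out[::-1]
-- ===== SOURCE B (Python) =====
-- def optimised(a: int):
--     # Index-based formulation: count the base-8 digits of a, then compute each
--     # output digit independently from the quotient a // 8**k by a comprehension
--     # over the digit positions, most significant first (no mutable loop state,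
--     # no final reversal).
--     n = 0
--     t = a
--     while t > 0:
--         n += 1
--         t //= 8
--     def digit(x):
--         b = (x % 8) ^ 1
--         return (b ^ (x // 2 ** b) ^ 4) % 8
--     return [digit(a // 8 ** k) for k in reversed(range(n))]
-- ===== Notes on version B (the rewrite author's own statement) =====
-- stated objective: alternative
-- what changed: Replaced the stateful accumulate-then-reverse while loop with a two-stage index-based formulation: first count the octal digits, then compute each output digit independently from the k-th octal quotient by a comprehension over the positions in most-significant-first order, eliminating the mutable output list and the final reversal.
import Mathlib
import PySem

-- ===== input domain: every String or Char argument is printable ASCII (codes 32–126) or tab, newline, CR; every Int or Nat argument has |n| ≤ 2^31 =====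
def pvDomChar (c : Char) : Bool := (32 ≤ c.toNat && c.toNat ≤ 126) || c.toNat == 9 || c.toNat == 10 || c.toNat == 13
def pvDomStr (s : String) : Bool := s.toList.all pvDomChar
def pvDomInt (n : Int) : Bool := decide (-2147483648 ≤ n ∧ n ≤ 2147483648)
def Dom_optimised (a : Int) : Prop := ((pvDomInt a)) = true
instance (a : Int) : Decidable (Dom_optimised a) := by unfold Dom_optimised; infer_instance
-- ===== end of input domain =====

-- B replaces A's stateful accumulate-then-reverse loop with a two-stage index-based
-- formulation: count the base-8 digits, then map an independent per-position digit
-- function over the positions most-significant-first (objective: alternative).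

-- floordiv by 8 shrinks a positive Int (termination measure used by both ports)
theorem pvFloordiv8_toNat_lt (a : Int) (h : 0 < a) :
    (PySem.Int.floordiv a 8).toNat < a.toNat := by
  rw [PySem.Int.floordiv_eq_ediv_of_pos (by omega : (0:Int) < 8)]
  omega

-- ===== PORT A =====
-- the loop of A: state is (a, out); out.append(b % 8) each pass
-- (2 ** b: b = (a%8)^1 is in [0,8) when a > 0, so 'b.toNat' is exact here)
def optLoopA (a : Int) (out : List Int) : List Int :=
  if h : a > 0 then
    let b := PySem.Int.bxor (PySem.Int.mod a 8) 1
    let c := PySem.Int.floordiv a ((2:Int) ^ b.toNat)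
    let b2 := PySem.Int.bxor (PySem.Int.bxor b c) 4
    optLoopA (PySem.Int.floordiv a 8) (out ++ [PySem.Int.mod b2 8])
  else out
termination_by a.toNat
decreasing_by exact pvFloordiv8_toNat_lt a h

def optimised (a : Int) : List Int :=
  -- return out[::-1]; step -1 ≠ 0 so slice? is always 'some'
  (PySem.List.slice? (optLoopA a []) none none (-1)).getD []

-- ===== PORT B =====
-- stage 1 of Source B: the counting loop over t
def octCount (t : Int) (n : Nat) : Nat :=
  if h : t > 0 then octCount (PySem.Int.floordiv t 8) (n + 1) else n
termination_by t.toNat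
decreasing_by exact pvFloordiv8_toNat_lt t h

-- Source B's local 'digit' helper (x nonneg in use; toNat on the exponent is exact there)
def digitB (x : Int) : Int :=
  let b := PySem.Int.bxor (PySem.Int.mod x 8) 1
  PySem.Int.mod (PySem.Int.bxor (PySem.Int.bxor b (PySem.Int.floordiv x ((2:Int) ^ b.toNat))) 4) 8

def optimised_alt (a : Int) : List Int :=
  ((PySem.List.pyRange 0 (octCount a 0) 1).reverse).map
    (fun k => digitB (PySem.Int.floordiv a ((8:Int) ^ k.toNat)))

-- ===== PRECONDITION & SPEC =====
def Spec_optimised (a : Int) (out : List Int) : Prop := out = optimised_alt a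
instance (a : Int) (out : List Int) : Decidable (Spec_optimised a out) := by unfold Spec_optimised; infer_instance

-- ===== CLAIM (what is proved, stated in full; the proofs are below) =====
def Claim_equal_optimised : Prop := ∀ (a : Int), Dom_optimised a → Spec_optimised a (optimised a)

-- ===== LEMMAS AND PROOFS =====

theorem octCount_acc (t : Int) (n : Nat) : octCount t n = octCount t 0 + n := by
  by_cases h : t > 0
  · conv_lhs => rw [octCount]
    conv_rhs => rw [octCount]
    simp only [h, dif_pos]
    rw [octCount_acc (PySem.Int.floordiv t 8) (n+1),
        octCount_acc (PySem.Int.floordiv t 8) 1]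
    omega
  · conv_lhs => rw [octCount]
    conv_rhs => rw [octCount]
    simp [h]
termination_by t.toNat
decreasing_by all_goals exact pvFloordiv8_toNat_lt t h

-- the loop of A computes, in ascending position order, the digits B assigns to
-- positions 0..n-1 (composition of floordivs by powers of 8)
theorem optLoopA_eq (a : Int) (out : List Int) :
    optLoopA a out
      = out ++ (List.range (octCount a 0)).map
          (fun k => digitB (PySem.Int.floordiv a ((8:Int) ^ k))) := by
  by_cases h : a > 0
  · rw [optLoopA]
    simp only [h, dif_pos]
    rw [optLoopA_eq (PySem.Int.floordiv a 8)]
    conv_rhs => rw [octCount]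
    simp only [h, dif_pos]
    rw [octCount_acc (PySem.Int.floordiv a 8) 1, List.range_succ_eq_map,
        List.append_assoc]
    simp only [List.map_cons, List.map_map, List.singleton_append]
    congr 1
    congr 1
    · simp only [digitB, pow_zero]
      rw [PySem.Int.floordiv_eq_ediv_of_pos (by omega : (0:Int) < 1)]
      simp
    · apply List.map_congr_left
      intro k _
      simp only [Function.comp, Nat.succ_eq_add_one]
      congr 1
      rw [PySem.Int.floordiv_eq_ediv_of_pos (by positivity : (0:Int) < (8:Int) ^ k),
          PySem.Int.floordiv_eq_ediv_of_pos (by omega : (0:Int) < 8),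
          PySem.Int.floordiv_eq_ediv_of_pos (by positivity : (0:Int) < (8:Int) ^ (k+1))]
      rw [Int.ediv_ediv_of_nonneg]
      · ring_nf
      · omega
  · rw [optLoopA, octCount]; simp [h]
termination_by a.toNat
decreasing_by exact pvFloordiv8_toNat_lt a h

-- B's reversed-range map equals the reverse of A's ascending digit list
theorem alt_eq (a : Int) :
    optimised_alt a
      = ((List.range (octCount a 0)).map
          (fun k => digitB (PySem.Int.floordiv a ((8:Int) ^ k)))).reverse := by
  unfold optimised_alt
  rw [PySem.List.pyRange_zero_nat, ← List.map_reverse, List.map_map, ← List.map_reverse]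
  congr 1

-- ===== VERDICT (by name: the statement is the Claim_ definition above) =====
theorem optimised_spec : Claim_equal_optimised := by
  intro a _
  unfold Spec_optimised optimised
  rw [optLoopA_eq, alt_eq, PySem.List.slice?_none_none_neg_one]
  simp
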